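-- pv_equiv track=rewrite | github.com/pypi-data/pypi-mirror-400 | packages/warden-core/warden_core-1.8.4.tar.gz/warden_core-1.8.4/src/warden/infrastructure/ci/github_actions.py | _generate_triggers
-- ===== SOURCE A (Python) =====
-- from typing import Dict, List, Optional
--
-- def _generate_triggers(events: List[str]) -> str:
--     """Generate trigger section for workflow."""
--     if len(events) == 1:
--         return f"'on': [{events[0]}]"
--
--     trigger_lines = ["'on':"]
--     for event in events:
--         if event == "push":
--             trigger_lines.extend(
--                 [
--                     "  push:",
--                     "    branches:",
--                     "      - main",
--                     "      - dev",
--                 ]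
--             )
--         elif event == "pull_request":
--             trigger_lines.extend(
--                 [
--                     "  pull_request:",
--                     "    branches:",
--                     "      - main",
--                     "      - dev",
--                 ]
--             )
--         elif event == "schedule":
--             trigger_lines.extend(
--                 [
--                     "  schedule:",
--                     "    - cron: '0 0 * * 0'  # Weekly on Sunday",
--                 ]
--             )
--         else:
--             trigger_lines.append(f"  {event}:")
--
--     return "\n".join(trigger_lines)
-- ===== SOURCE B (Python) =====
-- def _blocks(events):
--     """Trigger text for events, each block prefixed by its newline (divide and conquer)."""
--     n = len(events)
--     if n == 0:
--         return ""
--     if n == 1: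
--         e = events[0]
--         if e in ("push", "pull_request"):
--             return f"\n  {e}:\n    branches:\n      - main\n      - dev"
--         if e == "schedule":
--             return "\n  schedule:\n    - cron: '0 0 * * 0'  # Weekly on Sunday"
--         return f"\n  {e}:"
--     mid = n // 2
--     return _blocks(events[:mid]) + _blocks(events[mid:])
--
--
-- def _generate_triggers(events):
--     """Generate trigger section for workflow."""
--     if len(events) == 1:
--         return f"'on': [{events[0]}]"
--     return "'on':" + _blocks(events)
-- ===== Notes on version B (the rewrite author's own statement) =====
-- stated objective: alternative
-- what changed: Replaces A's single pass that grows a mutable line list and joins with newlines by a divide-and-conquer recursion that halves the event list and concatenates the trigger text of the two halves directly (no line list, no join, push/pull_request merged into one case with each block carrying its own leading newline).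
import Mathlib
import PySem

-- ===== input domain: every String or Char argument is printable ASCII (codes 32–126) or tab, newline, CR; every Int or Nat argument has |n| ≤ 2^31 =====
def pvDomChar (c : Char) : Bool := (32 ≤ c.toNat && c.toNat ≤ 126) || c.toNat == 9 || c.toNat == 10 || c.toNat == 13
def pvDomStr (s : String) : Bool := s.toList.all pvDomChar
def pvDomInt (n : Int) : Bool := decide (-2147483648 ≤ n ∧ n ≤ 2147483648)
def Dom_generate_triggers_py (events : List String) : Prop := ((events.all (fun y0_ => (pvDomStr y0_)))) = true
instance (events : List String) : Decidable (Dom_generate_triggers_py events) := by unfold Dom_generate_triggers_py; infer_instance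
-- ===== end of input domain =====

-- B builds the trigger text by divide-and-conquer on the event list (halve, recurse, concatenate newline-prefixed blocks) instead of A's line-list plus join; return value only, same result.


-- ===== PORT A =====
def generate_triggers_py (events : List String) : String :=
  if events.length == 1 then
    "'on': [" ++ PySem.List.pyGetD events 0 "" ++ "]"
  else
    let trigger_lines := events.foldl (fun acc event =>
      if event == "push" then
        acc ++ ["  push:", "    branches:", "      - main", "      - dev"]
      else if event == "pull_request" then
        acc ++ ["  pull_request:", "    branches:", "      - main", "      - dev"]
      else if event == "schedule" then
        acc ++ ["  schedule:", "    - cron: '0 0 * * 0'  # Weekly on Sunday"]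
      else
        acc ++ ["  " ++ event ++ ":"]) ["'on':"]
    PySem.Str.join "\n" trigger_lines

-- ===== PORT B =====
-- helper _blocks of Source B: divide and conquer over the event list
def pvBlocks (events : List String) : String :=
  if events.length = 0 then ""
  else if events.length = 1 then
    let e := PySem.List.pyGetD events 0 ""
    if e == "push" || e == "pull_request" then
      "\n  " ++ e ++ ":\n    branches:\n      - main\n      - dev"
    else if e == "schedule" then
      "\n  schedule:\n    - cron: '0 0 * * 0'  # Weekly on Sunday"
    else
      "\n  " ++ e ++ ":"
  else
    let mid := events.length / 2
    pvBlocks (PySem.List.slice events none (some (mid : Int))) ++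
    pvBlocks (PySem.List.slice events (some (mid : Int)) none)
termination_by events.length
decreasing_by
  · rw [PySem.List.slice_to_natCast]; simp [List.length_take]; omega
  · rw [PySem.List.slice_from_natCast]; simp [List.length_drop]; omega

def generate_triggers_py_alt (events : List String) : String :=
  if events.length == 1 then
    "'on': [" ++ PySem.List.pyGetD events 0 "" ++ "]"
  else
    "'on':" ++ pvBlocks events

-- ===== PRECONDITION & SPEC =====
def Spec_generate_triggers_py (events : List String) (out : String) : Prop := out = generate_triggers_py_alt events
instance (events : List String) (out : String) : Decidable (Spec_generate_triggers_py events out) := by unfold Spec_generate_triggers_py; infer_instance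

-- ===== CLAIM (what is proved, stated in full; the proofs are below) =====
def Claim_equal_generate_triggers_py : Prop := ∀ (events : List String), Dom_generate_triggers_py events → Spec_generate_triggers_py events (generate_triggers_py events)

-- ===== LEMMAS AND PROOFS =====

-- the per-event lines A appends
def pvLinesOf (e : String) : List String :=
  if e == "push" then ["  push:", "    branches:", "      - main", "      - dev"]
  else if e == "pull_request" then ["  pull_request:", "    branches:", "      - main", "      - dev"]
  else if e == "schedule" then ["  schedule:", "    - cron: '0 0 * * 0'  # Weekly on Sunday"]
  else ["  " ++ e ++ ":"]

-- the per-event newline-prefixed block B's leaves produce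
def pvBlockOf (e : String) : String :=
  if e == "push" || e == "pull_request" then
    "\n  " ++ e ++ ":\n    branches:\n      - main\n      - dev"
  else if e == "schedule" then
    "\n  schedule:\n    - cron: '0 0 * * 0'  # Weekly on Sunday"
  else
    "\n  " ++ e ++ ":"

lemma pvFoldlA (events : List String) (acc : List String) :
    events.foldl (fun acc event =>
      if event == "push" then
        acc ++ ["  push:", "    branches:", "      - main", "      - dev"]
      else if event == "pull_request" then
        acc ++ ["  pull_request:", "    branches:", "      - main", "      - dev"]
      else if event == "schedule" then
        acc ++ ["  schedule:", "    - cron: '0 0 * * 0'  # Weekly on Sunday"]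
      else
        acc ++ ["  " ++ event ++ ":"]) acc = acc ++ events.flatMap pvLinesOf := by
  induction events generalizing acc with
  | nil => simp
  | cons e rest ih =>
      simp only [List.foldl_cons, List.flatMap_cons, ih, pvLinesOf]
      split_ifs <;> simp

-- concatenating blocks is a fold, and that fold is a monoid homomorphism
lemma pvFoldrConcat (l : List String) (s : String) :
    l.foldr (fun e out => pvBlockOf e ++ out) s =
    l.foldr (fun e out => pvBlockOf e ++ out) "" ++ s := by
  induction l with
  | nil => simp
  | cons e rest ih => simp [ih, String.append_assoc]

-- B's divide-and-conquer helper computes the concatenation of the per-event blocks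
lemma pvBlocksEq (events : List String) :
    pvBlocks events = events.foldr (fun e out => pvBlockOf e ++ out) "" := by
  induction hn : events.length using Nat.strong_induction_on generalizing events with
  | _ n ih =>
    unfold pvBlocks
    by_cases h0 : events.length = 0
    · simp [List.length_eq_zero_iff.mp h0]
    · by_cases h1 : events.length = 1
      · obtain ⟨e, he⟩ := List.length_eq_one_iff.mp h1
        subst he
        simp only [h1, if_true]
        simp [PySem.List.pyGetD, PySem.List.pyGet?, PySem.List.pyIdx?, pvBlockOf]
      · simp only [h0, h1, if_false]
        rw [PySem.List.slice_to_natCast, PySem.List.slice_from_natCast]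
        subst hn
        rw [ih _ (by simp; omega) _ rfl, ih _ (by simp; omega) _ rfl]
        conv_rhs => rw [← List.take_append_drop (events.length / 2) events]
        rw [List.foldr_append]
        exact (pvFoldrConcat _ _).symm

-- joining h with an event's lines equals appending the event's block to h
lemma pvStep (h : List Char) (e : String) (X : List (List Char)) :
    PySem.Chars.join "\n".toList (h :: ((pvLinesOf e).map String.toList ++ X)) =
    PySem.Chars.join "\n".toList ((h ++ (pvBlockOf e).toList) :: X) := by
  unfold pvLinesOf pvBlockOf
  by_cases h1 : e = "push"
  · subst h1
    cases X with
    | nil => simp [PySem.Chars.join_cons_cons, PySem.Chars.join_singleton]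
    | cons x xs => simp [PySem.Chars.join_cons_cons]
  · by_cases h2 : e = "pull_request"
    · subst h2
      cases X with
      | nil => simp [PySem.Chars.join_cons_cons, PySem.Chars.join_singleton]
      | cons x xs => simp [PySem.Chars.join_cons_cons]
    · by_cases h3 : e = "schedule"
      · subst h3
        cases X with
        | nil => simp [PySem.Chars.join_cons_cons, PySem.Chars.join_singleton]
        | cons x xs => simp [PySem.Chars.join_cons_cons]
      · simp only [beq_iff_eq, h1, h2, h3, if_false]
        cases X with
        | nil => simp [PySem.Chars.join_cons_cons, PySem.Chars.join_singleton, h1, h2]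
        | cons x xs => simp [PySem.Chars.join_cons_cons, h1, h2]

-- A's newline-join of a head plus the flattened lines equals the head plus the folded blocks
lemma pvMain (events : List String) (h : List Char) :
    PySem.Chars.join "\n".toList (h :: (events.flatMap pvLinesOf).map String.toList) =
    h ++ (events.foldr (fun e out => pvBlockOf e ++ out) "").toList := by
  induction events generalizing h with
  | nil => simp [PySem.Chars.join_singleton]
  | cons e rest ih =>
      rw [List.flatMap_cons, List.map_append, pvStep, ih]
      simp [List.append_assoc]

-- ===== VERDICT (by name: the statement is the Claim_ definition above) =====
theorem generate_triggers_py_spec : Claim_equal_generate_triggers_py := by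
  intro events _
  unfold Spec_generate_triggers_py generate_triggers_py generate_triggers_py_alt
  by_cases h1 : events.length == 1
  · simp [h1]
  · simp only [h1, Bool.false_eq_true, if_false]
    rw [pvFoldlA, pvBlocksEq]
    apply String.toList_inj.mp
    show (PySem.Str.join "\n" _).toList = _
    simp only [PySem.Str.join, List.singleton_append, List.map_cons]
    rw [pvMain]
    simp
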